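-- pv_equiv track=rewrite | github.com/sathinenisnigdhareddy/6Companies30days | goldman sachs/Greatest Common Divisor of Strings.py | check
-- ===== SOURCE A (Python) =====
-- def check(ans,str1):
--     a=ans
--     while(len(ans)<=len(str1)):
--         if(ans==str1):
--             return True
--         else:
--             ans=ans+a
--     return False
-- ===== SOURCE B (Python) =====
-- def check(ans, str1):
--     if not ans:
--         return str1 == ""
--     q, r = divmod(len(str1), len(ans))
--     return q >= 1 and r == 0 and ans * q == str1
-- ===== Notes on version B (the rewrite author's own statement) =====
-- stated objective: faster
-- what changed: Replaces the loop that repeatedly concatenates ans and compares against str1 with a closed-form check: one divmod plus a single repetition-and-compare.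
-- outside the precondition, e.g. on check('', 'a'): A does not finish within the time limit, B returns False
import Mathlib
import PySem

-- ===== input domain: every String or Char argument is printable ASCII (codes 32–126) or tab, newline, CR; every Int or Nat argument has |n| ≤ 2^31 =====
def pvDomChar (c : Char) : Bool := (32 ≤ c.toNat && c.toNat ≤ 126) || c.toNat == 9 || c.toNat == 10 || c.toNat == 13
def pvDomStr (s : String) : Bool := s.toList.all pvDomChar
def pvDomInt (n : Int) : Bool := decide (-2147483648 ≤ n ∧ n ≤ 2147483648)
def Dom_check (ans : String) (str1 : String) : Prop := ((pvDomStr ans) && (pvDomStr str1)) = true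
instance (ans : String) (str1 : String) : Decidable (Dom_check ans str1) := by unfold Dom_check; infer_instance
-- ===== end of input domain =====

-- B replaces A's quadratic grow-and-compare loop by a closed-form divmod + one repetition-and-compare.

-- ===== PORT A =====
-- A's while loop, with fuel |str1|+1 as a totality guard only: for nonempty ans the
-- loop grows ans each step so this fuel is never exhausted before the loop exits.
def checkLoop (a : List Char) (ans : List Char) (str1 : List Char) : Nat → Bool
  | 0 => false
  | fuel + 1 =>
    if ans.length ≤ str1.length then
      if ans = str1 then true else checkLoop a (ans ++ a) str1 fuel
    else false

def check (ans : String) (str1 : String) : Bool :=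
  checkLoop ans.toList ans.toList str1.toList (str1.toList.length + 1)

-- ===== PORT B =====
def check_alt (ans : String) (str1 : String) : Bool :=
  let la := ans.toList
  let ls := str1.toList
  if la = [] then ls = [] else
    let q := ls.length / la.length
    let r := ls.length % la.length
    decide (1 ≤ q) && decide (r = 0) && decide ((List.replicate q la).flatten = ls)

-- ===== PRECONDITION & SPEC =====
-- Pre_ excludes empty ans with nonempty str1: there A's while loop never terminates (ans never grows).
def Pre_check (ans : String) (str1 : String) : Prop := ans ≠ "" ∨ str1 = ""
instance (ans : String) (str1 : String) : Decidable (Pre_check ans str1) := by unfold Pre_check; infer_instance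
def pvWitness_check : String × String := ("ab", "abab")

def Spec_check (ans : String) (str1 : String) (out : Bool) : Prop := out = check_alt ans str1
instance (ans : String) (str1 : String) (out : Bool) : Decidable (Spec_check ans str1 out) := by unfold Spec_check; infer_instance

-- ===== CLAIM (what is proved, stated in full; the proofs are below) =====
def Claim_equal_check : Prop := ∀ (ans : String) (str1 : String), Dom_check ans str1 → Pre_check ans str1 → Spec_check ans str1 (check ans str1)

-- ===== LEMMAS AND PROOFS =====

theorem length_flatten_replicate (a : List Char) (m : Nat) :
    (List.replicate m a).flatten.length = m * a.length := by
  induction m with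
  | zero => simp
  | succ m ih => simp [List.replicate_succ, ih, Nat.succ_mul, Nat.add_comm]

theorem checkLoop_spec (a str1 : List Char) :
    ∀ (fuel : Nat) (ans : List Char), str1.length < ans.length + fuel * a.length →
    (checkLoop a ans str1 fuel = true ↔ ∃ k, ans ++ (List.replicate k a).flatten = str1) := by
  intro fuel
  induction fuel with
  | zero =>
    intro ans hf
    simp only [checkLoop, Bool.false_eq_true, false_iff]
    rintro ⟨k, hk⟩
    have := congrArg List.length hk
    simp at this
    omega
  | succ fuel ih =>
    intro ans hf
    simp only [checkLoop]
    by_cases hle : ans.length ≤ str1.length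
    · simp only [hle, if_true]
      by_cases heq : ans = str1
      · simp only [heq, if_true, true_iff]
        exact ⟨0, by simp⟩
      · simp only [heq, if_false]
        have hf' : str1.length < (ans ++ a).length + fuel * a.length := by
          simp [Nat.succ_mul] at hf ⊢; omega
        rw [ih (ans ++ a) hf']
        constructor
        · rintro ⟨k, hk⟩
          exact ⟨k + 1, by simpa [List.replicate_succ, List.append_assoc] using hk⟩
        · rintro ⟨k, hk⟩
          cases k with
          | zero => exact absurd (by simpa using hk) heq
          | succ k =>
            exact ⟨k, by simpa [List.replicate_succ, List.append_assoc] using hk⟩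
    · simp only [hle, if_false, Bool.false_eq_true, false_iff]
      rintro ⟨k, hk⟩
      have := congrArg List.length hk
      simp at this
      omega

theorem check_iff (ans str1 : String) (ha : ans.toList ≠ []) :
    check ans str1 = true ↔ ∃ k, (List.replicate (k + 1) ans.toList).flatten = str1.toList := by
  have halen : 1 ≤ ans.toList.length := by
    cases h : ans.toList with
    | nil => exact absurd h ha
    | cons c t => simp
  unfold check
  rw [checkLoop_spec ans.toList str1.toList (str1.toList.length + 1) ans.toList
      (by nlinarith)]
  constructor
  · rintro ⟨k, hk⟩
    exact ⟨k, by simpa [List.replicate_succ] using hk⟩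
  · rintro ⟨k, hk⟩
    exact ⟨k, by simpa [List.replicate_succ] using hk⟩

theorem check_alt_iff (ans str1 : String) (ha : ans.toList ≠ []) :
    check_alt ans str1 = true ↔ ∃ k, (List.replicate (k + 1) ans.toList).flatten = str1.toList := by
  have halen : 0 < ans.toList.length := List.length_pos_iff.mpr ha
  unfold check_alt
  simp only [ha, if_false, Bool.and_eq_true, decide_eq_true_eq]
  constructor
  · rintro ⟨⟨hq, hr⟩, hrep⟩
    refine ⟨str1.toList.length / ans.toList.length - 1, ?_⟩
    have : str1.toList.length / ans.toList.length - 1 + 1 = str1.toList.length / ans.toList.length := by omega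
    rw [this]; exact hrep
  · rintro ⟨k, hk⟩
    have hlen := congrArg List.length hk
    rw [length_flatten_replicate] at hlen
    have hq : str1.toList.length / ans.toList.length = k + 1 := by
      rw [← hlen]; exact Nat.mul_div_cancel _ halen
    have hr : str1.toList.length % ans.toList.length = 0 := by
      rw [← hlen]; exact Nat.mul_mod_left _ _
    exact ⟨⟨by omega, hr⟩, by rw [hq]; exact hk⟩

-- ===== VERDICT (by name: the statement is the Claim_ definition above) =====
theorem check_spec : Claim_equal_check := by
  intro ans str1 _ hpre
  unfold Spec_check
  by_cases ha : ans.toList = []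
  · have hans : ans = "" := String.toList_eq_nil_iff.mp ha
    rcases hpre with h | h
    · exact absurd hans h
    · subst hans h; decide
  · cases hA : check ans str1 <;> cases hB : check_alt ans str1 <;> try rfl
    · exact absurd ((check_iff ans str1 ha).mpr ((check_alt_iff ans str1 ha).mp hB)) (by simp [hA])
    · exact absurd ((check_alt_iff ans str1 ha).mpr ((check_iff ans str1 ha).mp hA)) (by simp [hB])
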